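-- pv_equiv track=rewrite | github.com/palpo-im/palpo | crates/admin-ui/fix_doctests.py | fix_doctest_block
-- ===== SOURCE A (Python) =====
-- def fix_doctest_block(content, start_pos):
--     """Fix a single doctest block by adding #[ignore] attribute."""
--     # Find the ```rust line
--     rust_start = content.rfind('/// ```rust', 0, start_pos)
--     if rust_start == -1:
--         return content, False
--
--     # Check if already has ignore
--     prev_lines = content[:rust_start].split('\n')
--     ignore_found = False
--     for line in reversed(prev_lines):
--         if '```rust' in line:
--             break
--         if 'ignore' in line.lower():
--             ignore_found = True
--             break
--
--     if ignore_found: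
--         return content, False
--
--     # Add #[ignore] before the ```rust line
--     # Find the line before ```rust
--     line_start = content.rfind('\n', 0, rust_start)
--     if line_start == -1:
--         return content, False
--
--     # Insert #[ignore] after the /// on the line before ```rust
--     # Look for the line containing /// just before ```rust
--     before_rust = content[:rust_start].rstrip()
--     if before_rust.endswith('///'):
--         # Replace the last '///' with '/// #[ignore]'
--         new_before_rust = before_rust[:-3] + '/// #[ignore]'
--         content = new_before_rust + content[rust_start:]
--         return content, True
--
--     return content, False
-- ===== SOURCE B (Python) =====
-- def fix_doctest_block(content, start_pos):
--     """Fix a single doctest block by adding #[ignore] attribute.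
--
--     Single forward pass over the lines before the block (a reset-on-marker
--     fold) instead of A's reversed scan with early breaks.
--     """
--     rust_start = content.rfind('/// ```rust', 0, start_pos)
--     if rust_start == -1:
--         return content, False
--
--     prefix = content[:rust_start]
--     ignore_found = False
--     for line in prefix.split('\n'):
--         if '```rust' in line:
--             ignore_found = False
--         elif 'ignore' in line.lower():
--             ignore_found = True
--
--     if ignore_found or content.rfind('\n', 0, rust_start) == -1:
--         return content, False
--
--     before_rust = prefix.rstrip()
--     if not before_rust.endswith('///'):
--         return content, False
--     return before_rust[:-3] + '/// #[ignore]' + content[rust_start:], True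
-- ===== Notes on version B (the rewrite author's own statement) =====
-- stated objective: simpler
-- what changed: The reversed per-line scan with two early breaks is replaced by a single forward fold over the lines in which a '```rust' marker resets the ignore flag and an 'ignore' line sets it, and the final insertion is built as one expression.
import Mathlib
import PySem

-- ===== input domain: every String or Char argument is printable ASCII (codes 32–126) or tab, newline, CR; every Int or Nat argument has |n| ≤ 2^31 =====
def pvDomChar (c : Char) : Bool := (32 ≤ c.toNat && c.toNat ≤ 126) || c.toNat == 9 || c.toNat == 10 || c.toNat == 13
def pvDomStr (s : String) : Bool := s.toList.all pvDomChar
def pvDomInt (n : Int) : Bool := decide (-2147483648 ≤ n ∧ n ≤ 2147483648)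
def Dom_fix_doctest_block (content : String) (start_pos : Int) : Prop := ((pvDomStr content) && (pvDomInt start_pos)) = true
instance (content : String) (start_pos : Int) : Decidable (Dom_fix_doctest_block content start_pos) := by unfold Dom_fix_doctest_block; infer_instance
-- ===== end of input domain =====

-- B replaces A's reversed per-line scan (with early breaks) by a single forward
-- fold over the lines, for a plainer single-pass decomposition (same cost).

-- ===== PORT A =====
-- A's `for line in reversed(prev_lines): if '```rust' in line: break; if 'ignore' in line.lower(): ignore_found = True; break`
def fixScanA (rls : List (List Char)) : Bool :=
  match rls with
  | [] => false
  | line :: rest =>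
    if PySem.Chars.isIn "```rust".toList line then false
    else if PySem.Chars.isIn "ignore".toList (PySem.Chars.lower line) then true
    else fixScanA rest

def fix_doctest_block (content : String) (start_pos : Int) : String × Bool :=
  let rust_start := PySem.Str.rfindFrom content "/// ```rust" 0 (some start_pos)
  if rust_start = -1 then (content, false)
  else
    let prev_lines := PySem.Chars.splitOn (PySem.List.slice content.toList none (some rust_start)) "\n".toList
    let ignore_found := fixScanA prev_lines.reverse
    if ignore_found then (content, false)
    else
      let line_start := PySem.Str.rfindFrom content "\n" 0 (some rust_start)
      if line_start = -1 then (content, false)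
      else
        let before_rust := PySem.Chars.rstrip (PySem.List.slice content.toList none (some rust_start))
        if PySem.Chars.endswith before_rust "///".toList then
          let new_before_rust := PySem.List.slice before_rust none (some (-3)) ++ "/// #[ignore]".toList
          (String.ofList (new_before_rust ++ PySem.List.slice content.toList (some rust_start) none), true)
        else (content, false)

-- ===== PORT B =====
def fix_doctest_block_alt (content : String) (start_pos : Int) : String × Bool :=
  let rust_start := PySem.Str.rfindFrom content "/// ```rust" 0 (some start_pos)
  if rust_start = -1 then (content, false)
  else
    let pre := PySem.List.slice content.toList none (some rust_start)
    let ignore_found := (PySem.Chars.splitOn pre "\n".toList).foldl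
      (fun b line =>
        if PySem.Chars.isIn "```rust".toList line then false
        else if PySem.Chars.isIn "ignore".toList (PySem.Chars.lower line) then true
        else b) false
    if ignore_found = true ∨ PySem.Str.rfindFrom content "\n" 0 (some rust_start) = -1 then
      (content, false)
    else
      let before_rust := PySem.Chars.rstrip pre
      if ¬ PySem.Chars.endswith before_rust "///".toList = true then (content, false)
      else
        (String.ofList (PySem.List.slice before_rust none (some (-3)) ++ "/// #[ignore]".toList ++
          PySem.List.slice content.toList (some rust_start) none), true)

-- ===== PRECONDITION & SPEC =====
def Spec_fix_doctest_block (content : String) (start_pos : Int) (out : String × Bool) : Prop := out = fix_doctest_block_alt content start_pos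
instance (content : String) (start_pos : Int) (out : String × Bool) : Decidable (Spec_fix_doctest_block content start_pos out) := by unfold Spec_fix_doctest_block; infer_instance

-- ===== CLAIM (what is proved, stated in full; the proofs are below) =====
def Claim_equal_fix_doctest_block : Prop := ∀ (content : String) (start_pos : Int), Dom_fix_doctest_block content start_pos → Spec_fix_doctest_block content start_pos (fix_doctest_block content start_pos)

-- ===== LEMMAS AND PROOFS =====

-- A's bottom-up scan with breaks equals B's forward fold with a reset.
theorem fixScanA_reverse (ls : List (List Char)) :
    fixScanA ls.reverse = ls.foldl
      (fun b line =>
        if PySem.Chars.isIn "```rust".toList line then false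
        else if PySem.Chars.isIn "ignore".toList (PySem.Chars.lower line) then true
        else b) false := by
  rw [show fixScanA ls.reverse = ls.reverse.foldr
      (fun line b =>
        if PySem.Chars.isIn "```rust".toList line then false
        else if PySem.Chars.isIn "ignore".toList (PySem.Chars.lower line) then true
        else b) false from by
    generalize ls.reverse = rls
    induction rls with
    | nil => rfl
    | cons l rest ih => simp only [fixScanA, ih, List.foldr_cons]]
  rw [List.foldr_reverse]

-- ===== VERDICT (by name: the statement is the Claim_ definition above) =====
theorem fix_doctest_block_spec : Claim_equal_fix_doctest_block := by
  intro content start_pos _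
  unfold Spec_fix_doctest_block fix_doctest_block fix_doctest_block_alt
  simp only [fixScanA_reverse]
  split_ifs <;> simp_all [List.append_assoc]
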